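-- pv_equiv track=rewrite | github.com/berkanyikilmaz/CS115-Lab-Assignments | LAB 3/Lab03_MustafaBerkanYıkılmaz_Q1.py | capitalize_neat_reversibles
-- ===== SOURCE A (Python) =====
-- def is_neat_reversible(s):
--     """
--     Finds whether or not the string is 'neat reversible'. If a string is the same as the original string
--     after moving its first character to the end and reversing it, it is neat reversible.
--
--     Parameters
--     ----------
--     s (string): string which will be checked if it is neat reversible or not
--
--     Returns
--     -------
--     bool: True if string is neat reversible
--           False if string is not neat reversible
--
--     """
--     if s == '':
--         return False
--     else:
--         empty = ''
--
--         empty += s[0]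
--
--         for i in s[:-len(s):-1]:
--             empty += i
--
--         if s == empty:
--             return True
--         else:
--             return False
--
-- def uppercase_word_at(s, index):
--     """
--     Returns a string which is identical to the string given except the letters in string starting
--     from the index that is inputted up to the first space.
--
--     Parameters
--     ----------
--     s (string): String that some of the letters starting from index will be capitalized until the first space.
--     index : The index that the letters starting from this index will be capitalized until the first space
--
--     Returns
--     -------
--     string: return new_string: A new string whose letters starting from index until
--     the first space are capitalized
--
--     """
--     new_string = ""
--     space_index = 0
--
--     new_string += s[:index]
--
--     for i in range(index, len(s)): #if index starts from space?
--         if s[i] == ' ':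
--             space_index = i
--             break
--         else:
--             new_string += s[i].upper() #can i use this method
--
--     if space_index != 0:
--         new_string += s[space_index: len(s)]
--
--     return new_string
--
-- def capitalize_neat_reversibles(s):
--     """
--     Capitalizes all the neat revesible words in the string.
--
--     Parameters
--     ----------
--     s (string): String that all of the neat reversible words will be capitalized.
--
--     Returns
--     -------
--     string: return new_string: A new string whose neat reversible words are capitalized
--
--     """
--     index = 0
--     new_string = ''
--
--     for i in range(len(s)):
--         if s[i] == ' ':
--             if is_neat_reversible(s[index: i]):
--                 new_string += uppercase_word_at(s[index: i + 1], 0)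
--             else:
--                 new_string += s[index: i + 1]
--             index = i + 1
--
--     if is_neat_reversible(s[index: len(s)]):
--         new_string += uppercase_word_at(s[index: len(s)], 0)
--     else:
--         new_string += s[index: len(s)]
--
--     return new_string
-- ===== SOURCE B (Python) =====
-- def capitalize_neat_reversibles(s):
--     def neat(w):
--         return w != '' and w == w[0] + w[1:][::-1]
--     return ' '.join(w.upper() if neat(w) else w for w in s.split(' '))
-- ===== Notes on version B (the rewrite author's own statement) =====
-- stated objective: simpler
-- what changed: Replaces A's manual index-and-slice scan (word-boundary bookkeeping plus the uppercase_word_at re-scanning helper) with a single split-on-space / map / join over the word list, and the neat-reversible test's char-by-char rebuild loop with a direct slice comparison.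
import Mathlib
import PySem

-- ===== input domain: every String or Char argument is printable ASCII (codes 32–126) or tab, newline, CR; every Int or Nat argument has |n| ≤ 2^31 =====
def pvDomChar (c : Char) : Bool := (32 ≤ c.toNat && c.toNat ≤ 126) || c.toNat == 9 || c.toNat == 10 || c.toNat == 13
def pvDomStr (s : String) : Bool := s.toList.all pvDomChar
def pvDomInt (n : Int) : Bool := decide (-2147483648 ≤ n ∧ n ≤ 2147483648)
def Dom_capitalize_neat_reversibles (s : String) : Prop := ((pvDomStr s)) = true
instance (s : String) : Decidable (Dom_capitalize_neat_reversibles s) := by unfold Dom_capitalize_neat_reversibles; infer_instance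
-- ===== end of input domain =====

-- B replaces A's index-and-slice scan with a split(' ')/map/join over the word list (objective: simpler).

-- ===== PORT A =====
-- is_neat_reversible: empty = '' + s[0]; for i in s[:-len(s):-1]: empty += i; return s == empty
-- (s[0] is ported as pyGetD with an unreachable default, guarded by s ≠ ''; the slice step is the
--  literal -1 ≠ 0, so slice? is always `some` and the .getD [] default is unreachable)
def pvA_isNeat (cs : List Char) : Bool :=
  if cs = [] then false
  else
    let empty : List Char := [] ++ [PySem.List.pyGetD cs 0 ' ']
    let empty := ((PySem.List.slice? cs none (some (-(cs.length : Int))) (-1)).getD []).foldl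
        (fun acc c => acc ++ [c]) empty
    decide (cs = empty)

-- the for-loop of uppercase_word_at, with `break` as an early return; result = (new_string, space_index)
def pvA_upLoop (cs : List Char) : List Int → List Char → List Char × Int
  | [], acc => (acc, 0)
  | i :: rest, acc =>
    if PySem.List.pyGetD cs i ' ' = ' ' then (acc, i)
    else pvA_upLoop cs rest (acc ++ [PySem.Chars.upperChar (PySem.List.pyGetD cs i ' ')])

def pvA_upAt (cs : List Char) (index : Int) : List Char :=
  let r := pvA_upLoop cs (PySem.List.pyRange index (cs.length : Int) 1)
      (([] : List Char) ++ PySem.List.slice cs none (some index))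
  if r.2 ≠ 0 then r.1 ++ PySem.List.slice cs (some r.2) (some (cs.length : Int)) else r.1

-- the body of the for-loop of capitalize_neat_reversibles; state = (index, new_string)
def pvA_body (cs : List Char) (st : Int × List Char) (i : Int) : Int × List Char :=
  if PySem.List.pyGetD cs i ' ' = ' ' then
    if pvA_isNeat (PySem.List.slice cs (some st.1) (some i)) then
      (i + 1, st.2 ++ pvA_upAt (PySem.List.slice cs (some st.1) (some (i + 1))) 0)
    else (i + 1, st.2 ++ PySem.List.slice cs (some st.1) (some (i + 1)))
  else st

-- the code after the loop: the final chunk s[index:len(s)]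
def pvA_finish (cs : List Char) (st : Int × List Char) : List Char :=
  if pvA_isNeat (PySem.List.slice cs (some st.1) (some (cs.length : Int))) then
    st.2 ++ pvA_upAt (PySem.List.slice cs (some st.1) (some (cs.length : Int))) 0
  else st.2 ++ PySem.List.slice cs (some st.1) (some (cs.length : Int))

def capitalize_neat_reversibles (s : String) : String :=
  String.ofList (pvA_finish s.toList
    ((PySem.List.pyRange 0 (s.toList.length : Int) 1).foldl (pvA_body s.toList) (0, [])))

-- ===== PORT B =====
-- neat(w) = w != '' and w == w[0] + w[1:][::-1]   (w[0] via pyGetD, guarded; step -1 ≠ 0 so .getD [] unreachable)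
def pvB_neat (cs : List Char) : Bool :=
  !decide (cs = []) &&
    decide (cs = PySem.List.pyGetD cs 0 ' ' ::
      ((PySem.List.slice? (PySem.List.slice cs (some 1) none) none none (-1)).getD []))

def pvB_word (w : List Char) : List Char := if pvB_neat w then PySem.Chars.upper w else w

-- ' '.join(w.upper() if neat(w) else w for w in s.split(' '))   (sep ' ' ≠ '' so split? is `some`)
def capitalize_neat_reversibles_alt (s : String) : String :=
  String.ofList (PySem.Chars.join [' ']
    (((PySem.Chars.split? s.toList [' ']).getD []).map pvB_word))

-- ===== PRECONDITION & SPEC =====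
def Spec_capitalize_neat_reversibles (s : String) (out : String) : Prop := out = capitalize_neat_reversibles_alt s
instance (s : String) (out : String) : Decidable (Spec_capitalize_neat_reversibles s out) := by unfold Spec_capitalize_neat_reversibles; infer_instance

-- ===== CLAIM (what is proved, stated in full; the proofs are below) =====
def Claim_equal_capitalize_neat_reversibles : Prop := ∀ (s : String), Dom_capitalize_neat_reversibles s → Spec_capitalize_neat_reversibles s (capitalize_neat_reversibles s)

-- ===== LEMMAS AND PROOFS =====

-- Reference splitter: Python's s.split(' ') as plain structural recursion.
def pvSplitSp : List Char → List (List Char)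
  | [] => [[]]
  | c :: rest =>
    if c = ' ' then [] :: pvSplitSp rest
    else
      match pvSplitSp rest with
      | [] => [[c]]
      | w :: ws => (c :: w) :: ws

theorem pvSplitSp_ne_nil (cs : List Char) : pvSplitSp cs ≠ [] := by
  cases cs with
  | nil => simp [pvSplitSp]
  | cons c rest =>
    simp only [pvSplitSp]
    split
    · simp
    · split <;> simp

theorem pv_go_spec (l : List Char) (fuel : Nat) (cur : List Char) (acc : List (List Char))
    (h : l.length < fuel) :
    PySem.Chars.splitOn.go [' '] fuel l cur acc =
      acc.reverse ++ (match pvSplitSp l with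
        | [] => [cur.reverse]
        | w :: ws => (cur.reverse ++ w) :: ws) := by
  induction l generalizing fuel cur acc with
  | nil =>
    cases fuel with
    | zero => omega
    | succ f => rw [PySem.Chars.splitOn.go.eq_def]; simp [pvSplitSp]
  | cons c rest ih =>
    cases fuel with
    | zero => omega
    | succ f =>
      rw [PySem.Chars.splitOn.go.eq_def]
      simp only []
      by_cases hc : c = ' '
      · subst hc
        have hp : [' '].isPrefixOf (' ' :: rest) = true := by simp [List.isPrefixOf]
        rw [if_pos hp]
        simp only [List.length_cons, List.length_nil, List.drop_succ_cons, List.drop_zero]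
        rw [ih f [] (cur.reverse :: acc) (by simp at h; omega)]
        simp only [pvSplitSp, List.reverse_cons, List.reverse_nil, List.nil_append]
        cases hs : pvSplitSp rest with
        | nil => exact absurd hs (pvSplitSp_ne_nil rest)
        | cons w ws => simp
      · have hp : [' '].isPrefixOf (c :: rest) = false := by
          simp [List.isPrefixOf]; exact fun hh => absurd hh.symm hc
        rw [if_neg (by simp [hp])]
        rw [ih f (c :: cur) acc (by simp at h; omega)]
        simp only [pvSplitSp, if_neg hc]
        cases hs : pvSplitSp rest with
        | nil => exact absurd hs (pvSplitSp_ne_nil rest)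
        | cons w ws => simp

theorem pv_splitOn_space (cs : List Char) : PySem.Chars.splitOn cs [' '] = pvSplitSp cs := by
  unfold PySem.Chars.splitOn
  rw [pv_go_spec cs (cs.length + 1) [] [] (by omega)]
  cases hs : pvSplitSp cs with
  | nil => exact absurd hs (pvSplitSp_ne_nil cs)
  | cons w ws => simp

theorem pv_fm_range (L : List Char) :
    List.filterMap (fun x => L[x]?) (List.range L.length) = L := by
  have h1 : ∀ x ∈ List.range L.length, L[x]? = (some ∘ fun x => L.getD x ' ') x := by
    intro x hx
    have hx' := List.mem_range.mp hx
    simp [List.getD_eq_getElem?_getD, List.getElem?_eq_getElem hx']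
  rw [List.filterMap_congr h1, List.filterMap_eq_map]
  apply List.ext_getElem (by simp)
  intro i h1' h2'
  simp at h1'
  simp [List.getD_eq_getElem?_getD, List.getElem?_eq_getElem h1']

theorem pv_slice_neg_rev (cs : List Char) (h : cs ≠ []) :
    PySem.List.slice? cs none (some (-(cs.length : Int))) (-1) = some cs.tail.reverse := by
  have hn : 1 ≤ cs.length := List.length_pos_iff.mpr h
  unfold PySem.List.slice? PySem.List.sliceIndices
  norm_num
  have hpos : 0 < cs.length := hn
  simp only [if_pos hpos]
  by_cases h2 : (0:Int) < (cs.length:Int) - 1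
  · rw [if_pos h2]
    have hcnt : ((cs.length:Int) - 1 - 0).toNat = cs.length - 1 := by omega
    rw [hcnt]
    have hlen : cs.tail.reverse.length = cs.length - 1 := by simp
    have hmap : ∀ x ∈ List.range (cs.length - 1),
        cs[((cs.length:Int) - 1 + -(x:Int)).toNat]? = cs.tail.reverse[x]? := by
      intro x hx
      have hx' := List.mem_range.mp hx
      have hidx : ((cs.length:Int) - 1 + -(x:Int)).toNat = cs.length - 1 - x := by omega
      rw [hidx]
      rw [List.getElem?_eq_getElem (by omega : cs.length - 1 - x < cs.length),
          List.getElem?_eq_getElem (by rw [hlen]; omega : x < cs.tail.reverse.length)]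
      congr 1
      rw [List.getElem_reverse, List.getElem_tail]
      congr 1
      simp
      omega
    rw [List.filterMap_congr hmap]
    rw [← hlen, pv_fm_range]
  · have h1 : cs.length = 1 := by omega
    rw [if_neg h2]
    obtain ⟨a, t, rfl⟩ := List.exists_cons_of_ne_nil h
    simp at h1
    subst h1
    simp

theorem pv_neat_eq (w : List Char) : pvA_isNeat w = pvB_neat w := by
  cases w with
  | nil => simp [pvA_isNeat, pvB_neat]
  | cons c t =>
    have hs := pv_slice_neg_rev (c :: t) (by simp)
    simp only [List.tail_cons] at hs
    unfold pvA_isNeat pvB_neat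
    rw [if_neg (by simp)]
    simp only [hs, PySem.List.pyGetD_zero_cons, Option.getD_some, PySem.List.foldl_append_singleton,
      PySem.List.slice_from_one, PySem.List.slice?_none_none_neg_one, List.tail_cons]
    simp

theorem pv_upLoop_gen (cs : List Char) (k : Nat) (acc : List Char) (hk : k ≤ cs.length) :
    pvA_upLoop cs (PySem.List.pyRange (k : Int) (cs.length : Int) 1) acc =
      (acc ++ ((cs.drop k).takeWhile (· ≠ ' ')).map PySem.Chars.upperChar,
       if ' ' ∈ cs.drop k then ((k + ((cs.drop k).takeWhile (· ≠ ' ')).length : Nat) : Int) else 0) := by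
  induction hfuel : cs.length - k generalizing k acc with
  | zero =>
    have hk' : k = cs.length := by omega
    subst hk'
    have h0 : PySem.List.pyRange ((cs.length : Nat) : Int) (cs.length : Int) 1 = [] := by
      simp [pysem]
    rw [h0]
    simp [pvA_upLoop]
  | succ n ih =>
    have hlt : k < cs.length := by omega
    rw [PySem.List.pyRange_one_cons (by exact_mod_cast hlt : ((k : Nat) : Int) < (cs.length : Int))]
    have hget : PySem.List.pyGetD cs ((k : Nat) : Int) ' ' = cs[k] := by
      rw [PySem.List.pyGetD_natCast, List.getD_eq_getElem cs ' ' hlt]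
    have hdrop : cs.drop k = cs[k] :: cs.drop (k + 1) := List.drop_eq_getElem_cons hlt
    by_cases hsp : cs[k] = ' '
    · simp only [pvA_upLoop, hget, if_pos hsp, hdrop]
      rw [List.takeWhile_cons, if_neg (by simp [hsp])]
      simp [hsp]
    · simp only [pvA_upLoop, hget, if_neg hsp]
      have hcast : ((k : Nat) : Int) + 1 = (((k + 1 : Nat) : Nat) : Int) := by push_cast; ring
      rw [hcast, ih (k + 1) _ (by omega) (by omega)]
      have htw : List.takeWhile (fun x => decide (x ≠ ' ')) (cs[k] :: cs.drop (k + 1)) =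
          cs[k] :: List.takeWhile (fun x => decide (x ≠ ' ')) (cs.drop (k + 1)) := by
        rw [List.takeWhile_cons, if_pos (by simpa using hsp)]
      rw [hdrop, htw]
      refine Prod.ext ?_ ?_
      · simp
      · simp only [List.length_cons]
        by_cases hm : ' ' ∈ cs.drop (k + 1)
        · rw [if_pos hm, if_pos (List.mem_cons_of_mem _ hm)]
          congr 1
          omega
        · rw [if_neg hm, if_neg (by
            simp only [List.mem_cons]
            rintro (hh | hh)
            · exact hsp hh.symm
            · exact hm hh)]

theorem pv_upAt_nospace (w : List Char) (hns : ∀ c ∈ w, c ≠ ' ') :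
    pvA_upAt w 0 = PySem.Chars.upper w := by
  unfold pvA_upAt
  have h := pv_upLoop_gen w 0 (([] : List Char) ++ PySem.List.slice w none (some 0)) (Nat.zero_le _)
  simp only [Nat.cast_zero, List.drop_zero] at h
  rw [h]
  have htw : w.takeWhile (fun x => decide (x ≠ ' ')) = w :=
    List.takeWhile_eq_self_iff.mpr (fun c hc => by simpa using hns c hc)
  have hm : ¬ (' ' ∈ w) := fun hm => hns ' ' hm rfl
  rw [htw, if_neg hm]
  simp [PySem.List.slice_to, PySem.Chars.upper]

theorem pv_upAt_word_space (w : List Char) (hw : w ≠ []) (hns : ∀ c ∈ w, c ≠ ' ') :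
    pvA_upAt (w ++ [' ']) 0 = PySem.Chars.upper w ++ [' '] := by
  unfold pvA_upAt
  have h := pv_upLoop_gen (w ++ [' ']) 0
      (([] : List Char) ++ PySem.List.slice (w ++ [' ']) none (some 0)) (Nat.zero_le _)
  simp only [Nat.cast_zero, List.drop_zero] at h
  rw [h]
  have htww : w.takeWhile (fun x => decide (x ≠ ' ')) = w :=
    List.takeWhile_eq_self_iff.mpr (fun c hc => by simpa using hns c hc)
  have htw : (w ++ [' ']).takeWhile (fun x => decide (x ≠ ' ')) = w := by
    rw [List.takeWhile_append, htww, if_pos rfl]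
    simp
  have hm : ' ' ∈ w ++ [' '] := by simp
  rw [htw, if_pos hm]
  have hlen : 0 < w.length := List.length_pos_iff.mpr hw
  rw [if_pos (by
    have : (0:Int) < ((0 + w.length : Nat) : Int) := by exact_mod_cast (by omega : 0 < 0 + w.length)
    omega : ((0 + w.length : Nat) : Int) ≠ 0)]
  have hsl0 : PySem.List.slice (w ++ [' ']) none (some 0) = [] := by
    simp [pysem]
  have hcast : ((w ++ [' ']).length : Int) = ((w.length + 1 : Nat) : Int) := by simp
  simp only [hsl0, List.nil_append, Nat.zero_add]
  rw [hcast, PySem.List.slice_natCast]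
  have hd : (w ++ [' ']).drop w.length = [' '] := by
    rw [List.drop_left]
  rw [hd]
  have h1 : w.length + 1 - w.length = 1 := by omega
  rw [h1]
  simp [PySem.Chars.upper]

theorem pv_fold_nospace (cs : List Char) (ks : List Int) (st : Int × List Char)
    (h : ∀ i ∈ ks, PySem.List.pyGetD cs i ' ' ≠ ' ') :
    ks.foldl (pvA_body cs) st = st := by
  induction ks generalizing st with
  | nil => rfl
  | cons i rest ih =>
    simp only [List.foldl_cons]
    rw [show pvA_body cs st i = st from by unfold pvA_body; rw [if_neg (h i (by simp))]]
    exact ih st (fun j hj => h j (by simp [hj]))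

def pvCapRec (cs : List Char) : List Char :=
  PySem.Chars.join [' '] ((pvSplitSp cs).map pvB_word)

theorem pv_splitSp_nospace (w : List Char) (hns : ∀ c ∈ w, c ≠ ' ') : pvSplitSp w = [w] := by
  induction w with
  | nil => rfl
  | cons c rest ih =>
    simp only [pvSplitSp, if_neg (hns c (by simp))]
    rw [ih (fun x hx => hns x (by simp [hx]))]

theorem pv_splitSp_append_space (pre suf : List Char) (hns : ∀ c ∈ pre, c ≠ ' ') :
    pvSplitSp (pre ++ ' ' :: suf) = pre :: pvSplitSp suf := by
  induction pre with
  | nil => simp [pvSplitSp]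
  | cons c rest ih =>
    simp only [List.cons_append, pvSplitSp, if_neg (hns c (by simp))]
    rw [ih (fun x hx => hns x (by simp [hx]))]

theorem pv_capRec_cons (pre suf : List Char) (hns : ∀ c ∈ pre, c ≠ ' ') :
    pvCapRec (pre ++ ' ' :: suf) = pvB_word pre ++ ' ' :: pvCapRec suf := by
  unfold pvCapRec
  rw [pv_splitSp_append_space pre suf hns]
  cases hs : pvSplitSp suf with
  | nil => exact absurd hs (pvSplitSp_ne_nil suf)
  | cons w ws =>
    rw [List.map_cons, List.map_cons, PySem.Chars.join_cons_cons]
    simp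

theorem pv_main_inv (cs : List Char) (k : Nat) (acc : List Char) (hk : k ≤ cs.length) :
    pvA_finish cs
      ((PySem.List.pyRange (k : Int) (cs.length : Int) 1).foldl (pvA_body cs) ((k : Int), acc)) =
      acc ++ pvCapRec (cs.drop k) := by
  induction hn0 : cs.length - k using Nat.strong_induction_on generalizing k acc with
  | _ n ih =>
  by_cases hsp : ' ' ∈ cs.drop k
  case neg =>
    -- no space from k on: the loop leaves the state untouched
    have hns : ∀ i ∈ PySem.List.pyRange (k : Int) (cs.length : Int) 1,
        PySem.List.pyGetD cs i ' ' ≠ ' ' := by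
      intro i hi
      obtain ⟨h1, h2⟩ := PySem.List.mem_pyRange_one.mp hi
      have h0 : (0 : Int) ≤ i := le_trans (by exact_mod_cast Int.natCast_nonneg k) h1
      rw [PySem.List.pyGetD_eq_getElem cs ' ' h0 h2]
      intro hc
      apply hsp
      have hjk : k ≤ i.toNat := by omega
      have hjl : i.toNat - k < (cs.drop k).length := by
        rw [List.length_drop]; omega
      have heq : (cs.drop k)[i.toNat - k] = cs[i.toNat] := by
        rw [List.getElem_drop]
        congr 1
        omega
      rw [← hc, ← heq]
      exact List.getElem_mem hjl
    rw [pv_fold_nospace cs _ _ hns]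
    have hslice : PySem.List.slice cs (some ((k : Nat) : Int)) (some ((cs.length : Nat) : Int)) =
        cs.drop k := by
      rw [PySem.List.slice_natCast]
      exact List.take_of_length_le (by rw [List.length_drop])
    have hnsd : ∀ c ∈ cs.drop k, c ≠ ' ' := fun c hc he => hsp (he ▸ hc)
    unfold pvA_finish
    simp only [hslice]
    rw [pv_neat_eq]
    have hcap : pvCapRec (cs.drop k) = pvB_word (cs.drop k) := by
      unfold pvCapRec
      rw [pv_splitSp_nospace _ hnsd, List.map_cons, List.map_nil, PySem.Chars.join_singleton]
    rw [hcap]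
    unfold pvB_word
    by_cases hb : pvB_neat (cs.drop k)
    · rw [if_pos hb, if_pos hb, pv_upAt_nospace _ hnsd]
    · rw [if_neg hb, if_neg hb]
  case pos =>
    -- first space after k: split the word off
    set P : Char → Bool := fun x => decide (x ≠ ' ') with hP
    set pre := (cs.drop k).takeWhile P with hpre
    set dw := (cs.drop k).dropWhile P with hdw
    have h1 : pre ++ dw = cs.drop k := List.takeWhile_append_dropWhile
    have hdw_ne : dw ≠ [] := by
      intro h0
      rw [h0, List.append_nil] at h1
      have hmem : (' ' : Char) ∈ (cs.drop k).takeWhile P := by rw [← hpre, h1]; exact hsp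
      have := List.mem_takeWhile_imp hmem
      simp [hP] at this
    obtain ⟨d, rest, hdrest⟩ := List.exists_cons_of_ne_nil hdw_ne
    have hdsp : d = ' ' := by
      have hne : List.dropWhile P (cs.drop k) ≠ [] := by rw [← hdw]; exact hdw_ne
      have h9 : (List.dropWhile P (cs.drop k)).head? = some d := by rw [← hdw, hdrest]; rfl
      have h8 := List.head_dropWhile_not P (l := cs.drop k) hne
      have h7 := List.head?_eq_some_head (l := List.dropWhile P (cs.drop k)) hne
      rw [h9] at h7
      have h10 : (List.dropWhile P (cs.drop k)).head hne = d := (Option.some.injEq _ _ ▸ h7).symm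
      rw [h10] at h8
      simpa [hP] using h8
    subst hdsp
    have hpre_ns : ∀ c ∈ pre, c ≠ ' ' := by
      intro c hc
      have := List.mem_takeWhile_imp (hpre ▸ hc)
      simpa [hP] using this
    have hlen1 : pre.length + (1 + rest.length) = cs.length - k := by
      have hl := congrArg List.length h1
      simp [hdrest] at hl
      omega
    have hm_lt : k + pre.length < cs.length := by omega
    have hdm : cs.drop (k + pre.length) = ' ' :: rest := by
      have hdd : cs.drop (k + pre.length) = (cs.drop k).drop pre.length := by
        rw [List.drop_drop]
      rw [hdd, ← h1, List.drop_left, hdrest]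
    have hdm1 : cs.drop (k + pre.length + 1) = rest := by
      have hdd : cs.drop (k + pre.length + 1) = (cs.drop (k + pre.length)).drop 1 := by
        rw [List.drop_drop]
      rw [hdd, hdm]
      simp
    have hc_m : cs[k + pre.length]'hm_lt = ' ' := by
      have hg := List.drop_eq_getElem_cons hm_lt
      rw [hdm] at hg
      exact ((List.cons.injEq _ _ _ _).mp hg.symm).1
    have hsplit : PySem.List.pyRange ((k : Nat) : Int) ((cs.length : Nat) : Int) 1 =
        PySem.List.pyRange ((k : Nat) : Int) (((k + pre.length : Nat) : Nat) : Int) 1 ++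
        (((k + pre.length : Nat) : Int) ::
          PySem.List.pyRange (((k + pre.length + 1 : Nat) : Nat) : Int) ((cs.length : Nat) : Int) 1) := by
      rw [PySem.List.pyRange_one_append ((k : Nat) : Int) ((k + pre.length : Nat) : Int)
            ((cs.length : Nat) : Int) (by exact_mod_cast Nat.le_add_right k pre.length)
            (by exact_mod_cast hm_lt.le)]
      congr 1
      rw [PySem.List.pyRange_one_cons (by exact_mod_cast hm_lt)]
      norm_num
    rw [hsplit, List.foldl_append]
    have hfold1 : (PySem.List.pyRange ((k : Nat) : Int) ((k + pre.length : Nat) : Int) 1).foldl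
        (pvA_body cs) (((k : Nat) : Int), acc) = (((k : Nat) : Int), acc) := by
      apply pv_fold_nospace
      intro i hi
      obtain ⟨hi1, hi2⟩ := PySem.List.mem_pyRange_one.mp hi
      have h0 : (0 : Int) ≤ i := le_trans (by exact_mod_cast Int.natCast_nonneg k) hi1
      have hilt : i < ((cs.length : Nat) : Int) := lt_of_lt_of_le hi2 (by exact_mod_cast hm_lt.le)
      rw [PySem.List.pyGetD_eq_getElem cs ' ' h0 hilt]
      have hjk : k ≤ i.toNat := by omega
      have hjm : i.toNat - k < pre.length := by omega
      have hjl : i.toNat - k < (cs.drop k).length := by rw [List.length_drop]; omega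
      have h2 : (cs.drop k)[i.toNat - k]'hjl = cs[i.toNat] := by
        rw [List.getElem_drop]; congr 1; omega
      have h3 : (cs.drop k)[i.toNat - k]'hjl = pre[i.toNat - k]'hjm := by
        have h4 : (pre ++ dw)[i.toNat - k]'(by rw [h1]; exact hjl) = pre[i.toNat - k]'hjm :=
          List.getElem_append_left ..
        rw [← h4]
        congr 1
        exact h1.symm
      rw [← h2, h3]
      exact hpre_ns _ (List.getElem_mem hjm)
    rw [hfold1]
    have hslice1 : PySem.List.slice cs (some ((k : Nat) : Int)) (some ((k + pre.length : Nat) : Int)) =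
        pre := by
      rw [PySem.List.slice_natCast]
      have he : k + pre.length - k = pre.length := by omega
      rw [he, ← h1, List.take_left]
    have hslice2 : PySem.List.slice cs (some ((k : Nat) : Int)) (some (((k + pre.length : Nat) : Int) + 1)) =
        pre ++ [' '] := by
      have hc1 : (((k + pre.length : Nat) : Int) + 1) = (((k + pre.length + 1 : Nat) : Nat) : Int) := by
        push_cast; ring
      rw [hc1, PySem.List.slice_natCast]
      have he : k + pre.length + 1 - k = pre.length + 1 := by omega
      rw [he, ← h1, hdrest, List.take_append]
      simp
    have hbody : pvA_body cs (((k : Nat) : Int), acc) ((k + pre.length : Nat) : Int) =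
        ((((k + pre.length + 1 : Nat) : Nat) : Int), acc ++ (pvB_word pre ++ [' '])) := by
      unfold pvA_body
      rw [PySem.List.pyGetD_eq_getElem cs ' ' (by positivity) (by exact_mod_cast hm_lt)]
      have ht : ((k + pre.length : Nat) : Int).toNat = k + pre.length := by omega
      simp only [ht]
      rw [if_pos hc_m]
      simp only [hslice1, hslice2]
      rw [pv_neat_eq]
      unfold pvB_word
      by_cases hb : pvB_neat pre
      · rw [if_pos hb, if_pos hb, pv_upAt_word_space pre (by
          intro h0
          rw [h0] at hb
          simp [pvB_neat] at hb) hpre_ns]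
        refine Prod.ext ?_ rfl
        push_cast; ring
      · rw [if_neg hb, if_neg hb]
        refine Prod.ext ?_ rfl
        push_cast; ring
    rw [List.foldl_cons, hbody]
    have hrec := ih (cs.length - (k + pre.length + 1)) (by omega) (k + pre.length + 1)
        (acc ++ (pvB_word pre ++ [' '])) (by omega) rfl
    rw [hdm1] at hrec
    rw [hrec]
    have hck : cs.drop k = pre ++ ' ' :: rest := by rw [← h1, hdrest]
    rw [hck, pv_capRec_cons pre rest hpre_ns]
    simp

-- ===== VERDICT (by name: the statement is the Claim_ definition above) =====
theorem capitalize_neat_reversibles_spec : Claim_equal_capitalize_neat_reversibles := by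
  intro s _
  unfold Spec_capitalize_neat_reversibles capitalize_neat_reversibles capitalize_neat_reversibles_alt
  have h := pv_main_inv s.toList 0 [] (Nat.zero_le _)
  simp only [Nat.cast_zero, List.drop_zero, List.nil_append] at h
  rw [h]
  simp [PySem.Chars.split?, pv_splitOn_space, pvCapRec]
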